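-- pv_equiv track=rewrite | github.com/Tehlikeli107/counting-revolution | burnside_magma.py | burnside_count_polya
-- ===== SOURCE A (Python) =====
-- from math import gcd, factorial
--
-- def partitions(n):
--     """Generate all partitions of n as sorted lists (ascending)."""
--     if n == 0:
--         yield []
--         return
--     def helper(n, max_val):
--         if n == 0:
--             yield []
--             return
--         for i in range(1, min(n, max_val) + 1):
--             for rest in helper(n - i, i):
--                 yield [i] + rest
--     yield from helper(n, n)
--
-- def centralizer_size(cycle_type):
--     """Size of centralizer: z_lambda = prod(c^m_c * m_c!) over cycle lengths c."""
--     from collections import Counter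
--     counts = Counter(cycle_type)
--     z = 1
--     for c, m in counts.items():
--         z *= (c ** m) * factorial(m)
--     return z
--
-- def fixed_count_for_power(cycle_type, m):
--     """#{x in S: sigma^m(x) = x} = sum of cycle lengths that divide m."""
--     return sum(c for c in cycle_type if m % c == 0)
--
-- def fix_sigma(cycle_type, n):
--     """Number of fixed binary operations for a permutation with given cycle type.
--
--     |Fix(sigma)| = Prod_{i,j pairs of cycles} (fix_count(lcm(ci,cj)))^{gcd(ci,cj)}
--
--     where fix_count(m) = #{x: sigma^m(x)=x} = sum of cycle lengths dividing m.
--     """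
--     from math import lcm as math_lcm
--     result = 1
--     for ci in cycle_type:
--         for cj in cycle_type:
--             L = math_lcm(ci, cj)
--             g = gcd(ci, cj)
--             f = fixed_count_for_power(cycle_type, L)
--             result *= f ** g
--     return result
--
-- def burnside_count_polya(n):
--     """Exact magma iso-class count via Polya/Burnside enumeration.
--     Only p(n) cycle type iterations needed.
--     """
--     n_fact = factorial(n)
--     total = 0
--
--     for cycle_type in partitions(n):
--         z = centralizer_size(cycle_type)
--         num_perms = n_fact // z
--         fix = fix_sigma(cycle_type, n)
--         total += num_perms * fix
--
--     return total // n_fact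
-- ===== SOURCE B (Python) =====
-- from math import gcd, lcm, factorial
--
-- def _mult_partitions(n, maxv):
--     """Partitions of n (all parts <= maxv) as (part, multiplicity) lists with
--     strictly decreasing parts, built by choosing, for the largest part L, how
--     many copies k of L the partition gets."""
--     if n == 0:
--         return [[]]
--     out = []
--     for L in range(1, min(n, maxv) + 1):
--         for k in range(1, n // L + 1):
--             out += [[(L, k)] + rest for rest in _mult_partitions(n - k * L, L - 1)]
--     return out
--
-- def _fsum(items, L):
--     """#{x : sigma^L(x) = x} = sum of cycle lengths dividing L, with multiplicity."""
--     return sum(c * m for c, m in items if L % c == 0)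
--
-- def burnside_count_polya(n):
--     """Exact magma iso-class count via Burnside. Cycle types are enumerated
--     directly in multiplicity form (no per-cycle lists are ever built), and the
--     fixed-operation count uses a triangular pair loop over distinct part pairs,
--     doubling exponents by lcm/gcd symmetry."""
--     n_fact = factorial(n)
--     total = 0
--     for items in _mult_partitions(n, n):
--         z = 1
--         for c, mc in items:
--             z *= c ** mc * factorial(mc)
--         fix = 1
--         for a, (c, mc) in enumerate(items):
--             fix *= _fsum(items, c) ** (c * mc * mc)
--             for d, md in items[a + 1:]:
--                 fix *= _fsum(items, lcm(c, d)) ** (2 * gcd(c, d) * mc * md)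
--         total += (n_fact // z) * fix
--     return total // n_fact
-- ===== Notes on version B (the rewrite author's own statement) =====
-- stated objective: alternative
-- what changed: B enumerates cycle types directly in multiplicity form (a recursion that picks the largest part and how many copies it gets, so no per-cycle lists are ever built) and computes the fixed-operation count with a triangular loop over unordered pairs of distinct part lengths, doubling exponents by lcm/gcd symmetry, instead of A's square scan over all pairs of individual cycles with an inner re-scan per pair.
import Mathlib
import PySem

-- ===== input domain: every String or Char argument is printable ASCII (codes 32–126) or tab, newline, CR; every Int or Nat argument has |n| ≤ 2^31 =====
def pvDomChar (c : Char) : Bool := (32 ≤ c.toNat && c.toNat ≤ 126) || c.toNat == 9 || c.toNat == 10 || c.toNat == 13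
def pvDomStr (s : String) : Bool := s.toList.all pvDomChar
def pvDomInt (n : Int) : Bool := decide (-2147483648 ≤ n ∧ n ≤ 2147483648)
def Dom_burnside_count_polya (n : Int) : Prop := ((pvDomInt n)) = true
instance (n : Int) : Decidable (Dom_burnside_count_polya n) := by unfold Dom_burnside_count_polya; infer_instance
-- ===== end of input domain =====

-- B enumerates cycle types directly in multiplicity form (choosing, for each largest part, its number of copies) and uses a triangular symmetric pair loop; equivalence proved on the nonnegative domain.


-- ===== PORT A =====
-- partitions(n): helper(n, max_val) yields [i] + rest for i in range(1, min(n,max_val)+1), rest in helper(n-i, i)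
def pvPartHelperA (n maxv : Nat) : List (List Nat) :=
  if n = 0 then [[]]
  else (List.range' 1 (min n maxv)).attach.flatMap
    (fun i => (pvPartHelperA (n - i.1) i.1).map (fun rest => i.1 :: rest))
termination_by n
decreasing_by
  have hm := List.mem_range'_1.mp i.2
  omega

def pvPartitionsA (n : Nat) : List (List Nat) :=
  if n = 0 then [[]] else pvPartHelperA n n

-- centralizer_size: Counter(cycle_type); z *= c**m * factorial(m)  (counts are nonnegative, exact in Nat)
def pvCentralizerA (ct : List Nat) : Nat :=
  (PySem.Dict.counter ct).items.foldl
    (fun z cm => z * (cm.1 ^ cm.2.toNat * Nat.factorial cm.2.toNat)) 1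

-- fixed_count_for_power: sum(c for c in cycle_type if m % c == 0)  (all c ≥ 1, so Nat % is Python's %)
def pvFixedCountA (ct : List Nat) (m : Nat) : Nat :=
  ((ct.filter (fun c => m % c == 0)).sum)

-- fix_sigma: result *= fixed_count(lcm(ci,cj)) ** gcd(ci,cj) over all pairs of cycles
def pvFixSigmaA (ct : List Nat) : Nat :=
  ct.foldl (fun result ci =>
    ct.foldl (fun result cj =>
      result * pvFixedCountA ct (Nat.lcm ci cj) ^ Nat.gcd ci cj) result) 1

-- top level: all quantities nonnegative, so Python's // is Nat division
def burnside_count_polya (n : Int) : Int :=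
  let N := n.toNat
  let nfact := Nat.factorial N
  let total := (pvPartitionsA N).foldl
    (fun total ct =>
      let z := pvCentralizerA ct
      let numPerms := nfact / z
      let fix := pvFixSigmaA ct
      total + numPerms * fix) 0
  ((total / nfact : Nat) : Int)

-- ===== PORT B =====
-- _mult_partitions(n, maxv): for the largest part L (1..min(n,maxv)) choose its
-- multiplicity k (1..n//L), then recurse on n-k*L with parts ≤ L-1
def pvMultParts (n maxv : Nat) : List (List (Nat × Nat)) :=
  if n = 0 then [[]]
  else (List.range' 1 (min n maxv)).attach.flatMap (fun L =>
    (List.range' 1 (n / L.1)).attach.flatMap (fun k =>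
      (pvMultParts (n - k.1 * L.1) (L.1 - 1)).map (fun rest => (L.1, k.1) :: rest)))
termination_by n
decreasing_by
  have hL := List.mem_range'_1.mp L.2
  have hk := List.mem_range'_1.mp k.2
  have : 1 ≤ k.1 * L.1 := Nat.one_le_iff_ne_zero.mpr (Nat.mul_ne_zero (by omega) (by omega))
  omega

-- _fsum(items, L) = sum(c * m for c, m in items if L % c == 0)
def pvFsumB (items : List (Nat × Nat)) (L : Nat) : Nat :=
  ((items.filter (fun p => L % p.1 == 0)).map (fun p => p.1 * p.2)).sum

-- the enumerate/slice pair loop: for a,(c,mc): diagonal term, then items[a+1:]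
def pvFixGo (all : List (Nat × Nat)) : List (Nat × Nat) → Nat → Nat
  | [], fix => fix
  | (c, mc) :: rest, fix =>
    pvFixGo all rest
      (rest.foldl (fun fix dm =>
         fix * pvFsumB all (Nat.lcm c dm.1) ^ (2 * Nat.gcd c dm.1 * mc * dm.2))
       (fix * pvFsumB all c ^ (c * mc * mc)))

def burnside_count_polya_alt (n : Int) : Int :=
  let N := n.toNat
  let nfact := Nat.factorial N
  let total := (pvMultParts N N).foldl
    (fun total items =>
      let z := items.foldl (fun z cm => z * (cm.1 ^ cm.2 * Nat.factorial cm.2)) 1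
      let fix := pvFixGo items items 1
      total + (nfact / z) * fix) 0
  ((total / nfact : Nat) : Int)

-- ===== PRECONDITION & SPEC =====
-- Python's factorial(n) raises ValueError for n < 0; Pre_ excludes exactly those inputs.
def Pre_burnside_count_polya (n : Int) : Prop := 0 ≤ n
instance (n : Int) : Decidable (Pre_burnside_count_polya n) := by unfold Pre_burnside_count_polya; infer_instance
def pvWitness_burnside_count_polya : Int := 4

def Spec_burnside_count_polya (n : Int) (out : Int) : Prop := out = burnside_count_polya_alt n
instance (n : Int) (out : Int) : Decidable (Spec_burnside_count_polya n out) := by unfold Spec_burnside_count_polya; infer_instance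

-- ===== CLAIM (what is proved, stated in full; the proofs are below) =====
def Claim_equal_burnside_count_polya : Prop := ∀ (n : Int), Dom_burnside_count_polya n → Pre_burnside_count_polya n → Spec_burnside_count_polya n (burnside_count_polya n)

-- ===== LEMMAS AND PROOFS =====

-- expansion of a multiplicity list back into a cycle-type list
def pvExpand (items : List (Nat × Nat)) : List Nat :=
  items.flatMap (fun p => List.replicate p.2 p.1)

-- run-length items of a cycle type (proof-side grouped view)
def pvItemsB (ct : List Nat) : List (Nat × Nat) :=
  (PySem.List.dedup ct).map (fun c => (c, ct.count c))

def pvZB (items : List (Nat × Nat)) : Nat :=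
  items.foldl (fun z cm => z * (cm.1 ^ cm.2 * Nat.factorial cm.2)) 1

def pvFixBsq (items : List (Nat × Nat)) : Nat :=
  items.foldl (fun fix cm =>
    items.foldl (fun fix dm =>
      fix * pvFsumB items (Nat.lcm cm.1 dm.1) ^ (Nat.gcd cm.1 dm.1 * cm.2 * dm.2)) fix) 1

theorem pv_attach_flatMap {α β : Type} (l : List α) (f : α → List β) :
    l.attach.flatMap (fun x => f x.1) = l.flatMap f := by
  conv_rhs => rw [← List.attach_map_subtype_val l]
  rw [List.flatMap_map]

theorem pv_flatMap_congr {α β : Type} {l : List α} {f g : α → List β}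
    (h : ∀ x ∈ l, f x = g x) : l.flatMap f = l.flatMap g := by
  induction l with
  | nil => rfl
  | cons x t ih =>
    simp only [List.flatMap_cons, h x (List.mem_cons_self ..),
      ih (fun y hy => h y (List.mem_cons_of_mem _ hy))]

-- non-attach views of the recursive generators
theorem pvPartHelperA_eq (n maxv : Nat) :
    pvPartHelperA n maxv = if n = 0 then [[]]
      else (List.range' 1 (min n maxv)).flatMap
        (fun i => (pvPartHelperA (n - i) i).map (fun rest => i :: rest)) := by
  rw [pvPartHelperA]
  by_cases h : n = 0
  · simp [h]
  · simp only [if_neg h]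
    exact pv_attach_flatMap (List.range' 1 (min n maxv))
      (fun i => (pvPartHelperA (n - i) i).map (fun rest => i :: rest))

theorem pvMultParts_eq (n maxv : Nat) :
    pvMultParts n maxv = if n = 0 then [[]]
      else (List.range' 1 (min n maxv)).flatMap (fun L =>
        (List.range' 1 (n / L)).flatMap (fun k =>
          (pvMultParts (n - k * L) (L - 1)).map (fun rest => (L, k) :: rest))) := by
  rw [pvMultParts]
  by_cases h : n = 0
  · simp [h]
  · simp only [if_neg h]
    refine (pv_attach_flatMap (List.range' 1 (min n maxv))
      (fun L => (List.range' 1 (n / L)).attach.flatMap (fun k =>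
        (pvMultParts (n - k.1 * L) (L - 1)).map (fun rest => (L, k.1) :: rest)))).trans ?_
    exact pv_flatMap_congr (fun L _ => pv_attach_flatMap (List.range' 1 (n / L))
      (fun k => (pvMultParts (n - k * L) (L - 1)).map (fun rest => (L, k) :: rest)))

theorem pvDiv_succ {n i : Nat} (h1 : 1 ≤ i) (h2 : i ≤ n) : (n - i) / i + 1 = n / i := by
  conv_rhs => rw [← Nat.sub_add_cancel h2]
  rw [Nat.add_div_right _ h1]

theorem pv_range'_shift (n : Nat) : List.range' 2 n = (List.range' 1 n).map (· + 1) := by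
  induction n with
  | zero => rfl
  | succ m ih =>
    rw [List.range'_concat, List.range'_concat, ih, List.map_append]
    simp
    omega

theorem pvHelperA_split (m j : Nat) (hm : m ≠ 0) :
    pvPartHelperA m (j+1) = pvPartHelperA m j ++
      (if j+1 ≤ m then (pvPartHelperA (m - (j+1)) (j+1)).map (fun rest => (j+1) :: rest)
       else []) := by
  rw [pvPartHelperA_eq m (j+1), pvPartHelperA_eq m j, if_neg hm, if_neg hm]
  by_cases h : j + 1 ≤ m
  · rw [if_pos h, Nat.min_eq_right h, Nat.min_eq_right (by omega : j ≤ m),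
      List.range'_concat, List.flatMap_append]
    simp [Nat.add_comm]
  · rw [if_neg h, Nat.min_eq_left (by omega : m ≤ j + 1), Nat.min_eq_left (by omega : m ≤ j),
      List.append_nil]

theorem pvExpand_cons (p : Nat × Nat) (r : List (Nat × Nat)) :
    pvExpand (p :: r) = List.replicate p.2 p.1 ++ pvExpand r := by
  simp [pvExpand]

-- the unrolling of one part value into its multiplicities
theorem pvG (N : Nat)
    (ihM : ∀ m, m < N → ∀ v, pvPartHelperA m v = (pvMultParts m v).map pvExpand) :
    ∀ m, m < N → ∀ j, (pvPartHelperA m (j+1)).map (fun r => (j+1) :: r)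
      = (List.range' 1 (m / (j+1) + 1)).flatMap (fun k =>
          (pvMultParts (m + (j+1) - k * (j+1)) j).map
            (fun r => List.replicate k (j+1) ++ pvExpand r)) := by
  intro m
  induction m using Nat.strong_induction_on with
  | _ m ih =>
    intro hmN j
    have harg2 : ∀ k : Nat, m + (j+1) - (k+1) * (j+1) = m - k * (j+1) := by
      intro k
      have h1 : (k+1) * (j+1) = k * (j+1) + (j+1) := by ring
      omega
    by_cases hm : m = 0
    · subst hm
      have h1 : pvPartHelperA 0 (j+1) = [[]] := by rw [pvPartHelperA_eq]; simp
      have h2 : pvMultParts (0 + (j+1) - 1 * (j+1)) j = [[]] := by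
        rw [pvMultParts_eq]
        simp
      rw [h1, show (0:Nat) / (j+1) + 1 = 1 by simp,
        show List.range' 1 1 = [1] from rfl, List.flatMap_cons, List.flatMap_nil,
        List.append_nil, h2]
      simp [pvExpand]
    · rw [pvHelperA_split m j hm, List.map_append]
      have hfirst : (pvPartHelperA m j).map (fun r => (j+1) :: r)
          = (pvMultParts m j).map (fun r => List.replicate 1 (j+1) ++ pvExpand r) := by
        rw [ihM m hmN j, List.map_map]
        exact List.map_congr_left (fun r _ => by simp)
      by_cases h : j + 1 ≤ m
      · rw [if_pos h]
        have hdiv : m / (j+1) = (m - (j+1)) / (j+1) + 1 := (pvDiv_succ (by omega) h).symm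
        have hrec := ih (m - (j+1)) (by omega) (by omega) j
        rw [Nat.sub_add_cancel h] at hrec
        rw [hfirst, hdiv, List.range'_succ, List.flatMap_cons, pv_range'_shift,
          List.flatMap_map]
        congr 1
        · rw [Nat.one_mul, Nat.add_sub_cancel]
        · rw [hrec, List.map_flatMap]
          refine pv_flatMap_congr (fun k _ => ?_)
          rw [List.map_map, harg2 k]
          exact List.map_congr_left (fun r _ => by simp [List.replicate_succ])
      · rw [if_neg h]
        simp only [List.map_nil, List.append_nil]
        rw [hfirst]
        rw [Nat.div_eq_of_lt (by omega), show List.range' 1 (0+1) = [1] from rfl,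
          List.flatMap_cons, List.flatMap_nil, List.append_nil, Nat.one_mul,
          Nat.add_sub_cancel]

-- the two enumerations produce the same list of partitions, in the same order
theorem pvParts_expand : ∀ n v, pvPartHelperA n v = (pvMultParts n v).map pvExpand := by
  intro n
  induction n using Nat.strong_induction_on with
  | _ n ihM =>
    intro v
    by_cases hn : n = 0
    · subst hn; rw [pvPartHelperA_eq, pvMultParts_eq]; simp [pvExpand]
    · rw [pvPartHelperA_eq, pvMultParts_eq, if_neg hn, if_neg hn, List.map_flatMap]
      refine pv_flatMap_congr (fun i hi => ?_)
      have hib := List.mem_range'_1.mp hi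
      have h1i : 1 ≤ i := hib.1
      have hin : i ≤ n := le_trans (by omega) (min_le_left n v)
      obtain ⟨j, rfl⟩ : ∃ j, i = j + 1 := ⟨i - 1, by omega⟩
      have hG := pvG n ihM (n - (j+1)) (by omega) j
      rw [Nat.sub_add_cancel hin] at hG
      rw [hG, pvDiv_succ h1i hin, List.map_flatMap]
      refine pv_flatMap_congr (fun k _ => ?_)
      rw [List.map_map]
      exact (List.map_congr_left (fun r _ => by simp [pvExpand])).symm

-- invariant of the multiplicity lists
theorem pvMultParts_inv : ∀ n v items, items ∈ pvMultParts n v →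
    items.Pairwise (fun a b => b.1 < a.1) ∧ ∀ p ∈ items, 1 ≤ p.1 ∧ p.1 ≤ v ∧ 1 ≤ p.2 := by
  intro n
  induction n using Nat.strong_induction_on with
  | _ n ih =>
    intro v items hmem
    rw [pvMultParts_eq] at hmem
    by_cases hn : n = 0
    · rw [if_pos hn] at hmem
      simp at hmem
      subst hmem
      exact ⟨List.Pairwise.nil, by simp⟩
    · rw [if_neg hn] at hmem
      obtain ⟨L, hL, hmem⟩ := List.mem_flatMap.mp hmem
      obtain ⟨k, hk, hmem⟩ := List.mem_flatMap.mp hmem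
      obtain ⟨rest, hrest, rfl⟩ := List.mem_map.mp hmem
      have hLb := List.mem_range'_1.mp hL
      have hkb := List.mem_range'_1.mp hk
      have hkL : 1 ≤ k * L := Nat.one_le_iff_ne_zero.mpr (Nat.mul_ne_zero (by omega) (by omega))
      have hrec := ih (n - k * L) (by omega) (L - 1) rest hrest
      refine ⟨List.Pairwise.cons (fun b hb => ?_) hrec.1, ?_⟩
      · have := (hrec.2 b hb).2.1
        omega
      · intro p hp
        rcases List.mem_cons.mp hp with h | h
        · subst h
          refine ⟨by omega, le_trans (by omega) (min_le_right n v), by omega⟩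
        · have h2 := hrec.2 p h
          omega

-- a multiplying loop is the product of the mapped list
theorem pv_foldl_mul {α : Type} (l : List α) (h : α → Nat) (a : Nat) :
    l.foldl (fun x b => x * h b) a = a * (l.map h).prod := by
  induction l generalizing a with
  | nil => simp
  | cons x t ih => simp [ih, mul_assoc]

-- product over a list = product over its first-occurrence dedup with count exponents
theorem pv_prod_dedup (l : List Nat) (g : Nat → Nat) :
    (l.map g).prod = ((PySem.List.dedup l).map (fun c => g c ^ l.count c)).prod := by
  have hn : (PySem.List.dedup l).Nodup := PySem.List.nodup_dedup l
  have ht : (PySem.List.dedup l).toFinset = l.toFinset := by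
    ext x; simp
  rw [Finset.prod_list_map_count, ← List.prod_toFinset _ hn, ht]

theorem pv_sum_dedup (l : List Nat) (g : Nat → Nat) :
    (l.map g).sum = ((PySem.List.dedup l).map (fun c => g c * l.count c)).sum := by
  have hn : (PySem.List.dedup l).Nodup := PySem.List.nodup_dedup l
  have ht : (PySem.List.dedup l).toFinset = l.toFinset := by
    ext x; simp
  rw [Finset.sum_list_map_count, ← List.sum_toFinset _ hn, ht]
  exact Finset.sum_congr rfl fun x _ => by simp [smul_eq_mul, mul_comm]

theorem pv_prod_map_pow {α : Type} (l : List α) (h : α → Nat) (k : Nat) :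
    ((l.map h).prod) ^ k = (l.map (fun x => h x ^ k)).prod := by
  induction l with
  | nil => simp
  | cons x t ih => simp [mul_pow, ih]

theorem pv_sum_filter {α : Type} (l : List α) (p : α → Bool) (f : α → Nat) :
    ((l.filter p).map f).sum = (l.map (fun c => if p c then f c else 0)).sum := by
  induction l with
  | nil => simp
  | cons x t ih =>
    by_cases h : p x <;> simp [h, ih]

-- A's per-cycle quantities in the grouped run-length view
theorem pvZ_eq (ct : List Nat) : pvCentralizerA ct = pvZB (pvItemsB ct) := by
  unfold pvCentralizerA pvZB pvItemsB
  rw [PySem.Dict.items_counter, ← PySem.List.dedup_eq_ofList, List.foldl_map, List.foldl_map]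
  simp

theorem pvF_eq (ct : List Nat) (L : Nat) : pvFixedCountA ct L = pvFsumB (pvItemsB ct) L := by
  unfold pvFixedCountA pvFsumB pvItemsB
  rw [List.filter_map, List.map_map]
  have hL : ((ct.filter (fun c => L % c == 0)).map id).sum
      = (((PySem.List.dedup ct).filter (fun c => L % c == 0)).map (fun c => c * ct.count c)).sum := by
    rw [pv_sum_filter, pv_sum_filter, pv_sum_dedup]
    refine congrArg List.sum (List.map_congr_left fun c _ => ?_)
    by_cases h : (L % c == 0) <;> simp [h]
  simpa using hL

theorem pvFix_eq (ct : List Nat) : pvFixSigmaA ct = pvFixBsq (pvItemsB ct) := by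
  unfold pvFixSigmaA pvFixBsq
  have hA : ct.foldl (fun result ci =>
        ct.foldl (fun result cj =>
          result * pvFixedCountA ct (Nat.lcm ci cj) ^ Nat.gcd ci cj) result) 1
      = ct.foldl (fun result ci =>
          result * (ct.map (fun cj => pvFixedCountA ct (Nat.lcm ci cj) ^ Nat.gcd ci cj)).prod) 1 :=
    by apply PySem.List.foldl_congr_mem; intro acc ci _; exact pv_foldl_mul ct _ acc
  have hB : (pvItemsB ct).foldl (fun fix cm =>
        (pvItemsB ct).foldl (fun fix dm =>
          fix * pvFsumB (pvItemsB ct) (Nat.lcm cm.1 dm.1) ^ (Nat.gcd cm.1 dm.1 * cm.2 * dm.2)) fix) 1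
      = (pvItemsB ct).foldl (fun fix cm =>
          fix * ((pvItemsB ct).map (fun dm =>
            pvFsumB (pvItemsB ct) (Nat.lcm cm.1 dm.1) ^ (Nat.gcd cm.1 dm.1 * cm.2 * dm.2))).prod) 1 :=
    by apply PySem.List.foldl_congr_mem; intro acc cm _; exact pv_foldl_mul (pvItemsB ct) _ acc
  rw [hA, hB, pv_foldl_mul, pv_foldl_mul, one_mul, one_mul]
  simp only [← pvF_eq]
  rw [pv_prod_dedup]
  show _ = ((pvItemsB ct).map _).prod
  unfold pvItemsB
  rw [List.map_map]
  refine congrArg List.prod (List.map_congr_left fun c _ => ?_)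
  rw [pv_prod_dedup, pv_prod_map_pow]
  simp only [Function.comp_apply, List.map_map]
  refine congrArg List.prod (List.map_congr_left fun d _ => ?_)
  simp only [Function.comp_apply]
  rw [← pow_mul, ← pow_mul]
  exact congrArg (pvFixedCountA ct (Nat.lcm c d) ^ ·) (by ring)

-- membership in the expansion
theorem pv_mem_expand {x : Nat} {items : List (Nat × Nat)} :
    x ∈ pvExpand items ↔ ∃ p ∈ items, p.2 ≠ 0 ∧ x = p.1 := by
  simp only [pvExpand, List.mem_flatMap, List.mem_replicate]

-- counting in the expansion under distinct parts
theorem pv_count_expand : ∀ (items : List (Nat × Nat)), (items.map Prod.fst).Nodup →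
    ∀ c mc, (c, mc) ∈ items → (pvExpand items).count c = mc := by
  intro items
  induction items with
  | nil => intro _ c mc h; cases h
  | cons q rest ih =>
    intro hnd c mc hmem
    rw [List.map_cons, List.nodup_cons] at hnd
    rw [pvExpand_cons, List.count_append, List.count_replicate]
    rcases List.mem_cons.mp hmem with h | h
    · cases h
      rw [if_pos (show ((c, mc).1 == c) = true by simp)]
      have hz : (pvExpand rest).count c = 0 := by
        rw [List.count_eq_zero]
        intro hc
        obtain ⟨p, hp, _, rfl⟩ := pv_mem_expand.mp hc
        exact hnd.1 (List.mem_map.mpr ⟨p, hp, rfl⟩)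
      omega
    · have hne : c ≠ q.1 := fun he =>
        hnd.1 (he ▸ (List.mem_map.mpr ⟨(c, mc), h, rfl⟩ : c ∈ rest.map Prod.fst))
      have hcond : ¬((q.1 == c) = true) := by
        simp only [beq_iff_eq]
        exact fun he => hne he.symm
      rw [if_neg hcond, ih hnd.2 c mc h]
      omega

theorem pv_nodup_fst_of_pairwise {items : List (Nat × Nat)}
    (hpw : items.Pairwise (fun a b => b.1 < a.1)) : (items.map Prod.fst).Nodup := by
  induction items with
  | nil => simp
  | cons q rest ih =>
    rw [List.pairwise_cons] at hpw
    rw [List.map_cons, List.nodup_cons]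
    refine ⟨?_, ih hpw.2⟩
    intro hc
    obtain ⟨p, hp, hpq⟩ := List.mem_map.mp hc
    have := hpw.1 p hp
    omega

-- pvItemsB of the expansion is a permutation of the original multiplicity list
theorem pvItems_expand_perm (items : List (Nat × Nat))
    (hpw : items.Pairwise (fun a b => b.1 < a.1))
    (hpos : ∀ p ∈ items, 1 ≤ p.1 ∧ 1 ≤ p.2) :
    (pvItemsB (pvExpand items)).Perm items := by
  have hndfst := pv_nodup_fst_of_pairwise hpw
  have hndA : (pvItemsB (pvExpand items)).Nodup := by
    unfold pvItemsB
    refine List.Nodup.map ?_ (PySem.List.nodup_dedup _)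
    intro a b hab
    exact congrArg Prod.fst hab
  have hndB : items.Nodup := List.Nodup.of_map _ hndfst
  rw [List.perm_ext_iff_of_nodup hndA hndB]
  intro p
  constructor
  · intro hp
    unfold pvItemsB at hp
    obtain ⟨c, hc, hcp⟩ := List.mem_map.mp hp
    rw [PySem.List.mem_dedup] at hc
    obtain ⟨q, hq, hq2, rfl⟩ := pv_mem_expand.mp hc
    have hcount : (pvExpand items).count q.1 = q.2 := pv_count_expand items hndfst q.1 q.2 hq
    rw [hcount] at hcp
    rw [← hcp]
    exact hq
  · intro hp
    unfold pvItemsB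
    refine List.mem_map.mpr ⟨p.1, ?_, ?_⟩
    · rw [PySem.List.mem_dedup]
      exact pv_mem_expand.mpr ⟨p, hp, by have := (hpos p hp).2; omega, rfl⟩
    · rw [pv_count_expand items hndfst p.1 p.2 hp]

-- pvFsumB only depends on the list up to permutation
theorem pvFsumB_perm {l l' : List (Nat × Nat)} (h : l.Perm l') (L : Nat) :
    pvFsumB l L = pvFsumB l' L := by
  unfold pvFsumB
  exact ((h.filter _).map _).sum_eq

theorem pvZB_perm {l l' : List (Nat × Nat)} (h : l.Perm l') : pvZB l = pvZB l' := by
  unfold pvZB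
  rw [pv_foldl_mul, pv_foldl_mul, (h.map _).prod_eq]

-- the triangular loop computes the full square product
theorem pvFixGo_prod (all : List (Nat × Nat)) :
    ∀ (l : List (Nat × Nat)) (fix : Nat), pvFixGo all l fix
      = fix * (l.map (fun p => (l.map (fun q =>
          pvFsumB all (Nat.lcm p.1 q.1) ^ (Nat.gcd p.1 q.1 * p.2 * q.2))).prod)).prod := by
  intro l
  induction l with
  | nil => intro fix; simp [pvFixGo]
  | cons x r ih =>
    intro fix
    obtain ⟨c, mc⟩ := x
    rw [pvFixGo, ih, pv_foldl_mul]
    have hsplit : (r.map (fun p => ((c, mc) :: r).map (fun q =>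
          pvFsumB all (Nat.lcm p.1 q.1) ^ (Nat.gcd p.1 q.1 * p.2 * q.2)) |>.prod)).prod
        = (r.map (fun p =>
            pvFsumB all (Nat.lcm p.1 c) ^ (Nat.gcd p.1 c * p.2 * mc))).prod
          * (r.map (fun p => (r.map (fun q =>
              pvFsumB all (Nat.lcm p.1 q.1) ^ (Nat.gcd p.1 q.1 * p.2 * q.2))).prod)).prod := by
      rw [← List.prod_map_mul]
      refine congrArg List.prod (List.map_congr_left fun p _ => ?_)
      simp [List.map_cons]
    have hsym : (r.map (fun p =>
          pvFsumB all (Nat.lcm p.1 c) ^ (Nat.gcd p.1 c * p.2 * mc))).prod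
        = (r.map (fun q =>
            pvFsumB all (Nat.lcm c q.1) ^ (Nat.gcd c q.1 * mc * q.2))).prod := by
      refine congrArg List.prod (List.map_congr_left fun p _ => ?_)
      rw [Nat.lcm_comm, Nat.gcd_comm]
      congr 1
      ring
    have hdouble : (r.map (fun q =>
          pvFsumB all (Nat.lcm c q.1) ^ (Nat.gcd c q.1 * mc * q.2))).prod
        * (r.map (fun q =>
            pvFsumB all (Nat.lcm c q.1) ^ (Nat.gcd c q.1 * mc * q.2))).prod
        = (r.map (fun q =>
            pvFsumB all (Nat.lcm c q.1) ^ (2 * Nat.gcd c q.1 * mc * q.2))).prod := by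
      rw [← List.prod_map_mul]
      refine congrArg List.prod (List.map_congr_left fun q _ => ?_)
      rw [← pow_add]
      congr 1
      ring
    rw [List.map_cons, List.prod_cons, List.map_cons, List.prod_cons, hsplit, hsym,
      Nat.lcm_self, Nat.gcd_self, ← hdouble]
    ring

-- the square fold over any permutation of items equals the triangular loop over items
theorem pvFixBsq_perm_eq_go (items l : List (Nat × Nat)) (h : l.Perm items) :
    pvFixBsq l = pvFixGo items items 1 := by
  unfold pvFixBsq
  have hsq : l.foldl (fun fix cm =>
        l.foldl (fun fix dm =>
          fix * pvFsumB l (Nat.lcm cm.1 dm.1) ^ (Nat.gcd cm.1 dm.1 * cm.2 * dm.2)) fix) 1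
      = l.foldl (fun fix cm =>
          fix * (l.map (fun dm =>
            pvFsumB l (Nat.lcm cm.1 dm.1) ^ (Nat.gcd cm.1 dm.1 * cm.2 * dm.2))).prod) 1 :=
    by apply PySem.List.foldl_congr_mem; intro acc cm _; exact pv_foldl_mul l _ acc
  rw [hsq, pv_foldl_mul, one_mul, pvFixGo_prod, one_mul]
  have hf : pvFsumB l = pvFsumB items := funext (fun L => pvFsumB_perm h L)
  rw [hf]
  calc (l.map (fun cm => (l.map (fun dm =>
          pvFsumB items (Nat.lcm cm.1 dm.1) ^ (Nat.gcd cm.1 dm.1 * cm.2 * dm.2))).prod)).prod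
      = (l.map (fun cm => (items.map (fun dm =>
          pvFsumB items (Nat.lcm cm.1 dm.1) ^ (Nat.gcd cm.1 dm.1 * cm.2 * dm.2))).prod)).prod := by
        refine congrArg List.prod (List.map_congr_left fun cm _ => ?_)
        exact ((h.map _)).prod_eq
    _ = (items.map (fun cm => (items.map (fun dm =>
          pvFsumB items (Nat.lcm cm.1 dm.1) ^ (Nat.gcd cm.1 dm.1 * cm.2 * dm.2))).prod)).prod :=
        ((h.map _)).prod_eq

theorem pvPartitionsA_eq (n : Nat) : pvPartitionsA n = pvPartHelperA n n := by
  unfold pvPartitionsA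
  by_cases h : n = 0
  · subst h; rw [pvPartHelperA_eq]; simp
  · rw [if_neg h]

-- the two accumulated totals agree
theorem pv_total_eq (N : Nat) :
    (pvPartHelperA N N).foldl (fun total ct =>
      total + Nat.factorial N / pvCentralizerA ct * pvFixSigmaA ct) 0
    = (pvMultParts N N).foldl (fun total items =>
      total + Nat.factorial N /
        (items.foldl (fun z cm => z * (cm.1 ^ cm.2 * Nat.factorial cm.2)) 1)
        * pvFixGo items items 1) 0 := by
  rw [pvParts_expand, List.foldl_map]
  apply PySem.List.foldl_congr_mem
  intro acc items hmem
  obtain ⟨hpw, hbd⟩ := pvMultParts_inv N N items hmem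
  have hperm := pvItems_expand_perm items hpw (fun p hp => ⟨(hbd p hp).1, (hbd p hp).2.2⟩)
  rw [pvZ_eq, pvFix_eq, pvZB_perm hperm, pvFixBsq_perm_eq_go items _ hperm]
  rfl

-- ===== VERDICT (by name: the statement is the Claim_ definition above) =====
theorem burnside_count_polya_spec : Claim_equal_burnside_count_polya := by
  intro n _ _
  show ((((pvPartitionsA n.toNat).foldl (fun total ct =>
      total + Nat.factorial n.toNat / pvCentralizerA ct * pvFixSigmaA ct) 0)
        / Nat.factorial n.toNat : Nat) : Int)
    = ((((pvMultParts n.toNat n.toNat).foldl (fun total items =>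
      total + Nat.factorial n.toNat /
        (items.foldl (fun z cm => z * (cm.1 ^ cm.2 * Nat.factorial cm.2)) 1)
        * pvFixGo items items 1) 0) / Nat.factorial n.toNat : Nat) : Int)
  rw [pvPartitionsA_eq, pv_total_eq]
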